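-- pv_equiv track=rewrite | github.com/sjifire/utilities | src/sjifire/scripts/personal_calendar_sync.py | match_schedule_name_to_email
-- ===== SOURCE A (Python) =====
-- def normalize_name(name: str) -> str:
--     """Normalize a name for matching (lowercase, strip extra spaces)."""
--     return " ".join(name.lower().split())
--
-- def match_schedule_name_to_email(
--     schedule_name: str,
--     members: dict[str, str],
-- ) -> str | None:
--     """Match a schedule name to a member email.
--
--     Schedule names are "Last, First" format.
--     Member dict maps "First Last" -> email.
--
--     Args:
--         schedule_name: Name from schedule (e.g., "Greene, Adam")
--         members: Dict mapping display name to email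
--
--     Returns:
--         Email address or None if no match
--     """
--     # Parse "Last, First" into "First Last"
--     if ", " in schedule_name:
--         parts = schedule_name.split(", ", 1)
--         normalized_name = f"{parts[1]} {parts[0]}" if len(parts) == 2 else schedule_name
--     else:
--         normalized_name = schedule_name
--
--     normalized_name = normalize_name(normalized_name)
--
--     # Try exact match first
--     for display_name, email in members.items():
--         if normalize_name(display_name) == normalized_name:
--             return email
--
--     # Try partial match (schedule might have middle name)
--     for display_name, email in members.items():
--         display_normalized = normalize_name(display_name)
--         # Check if all words in display_name are in normalized_name
--         display_words = set(display_normalized.split())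
--         schedule_words = set(normalized_name.split())
--         if display_words <= schedule_words or schedule_words <= display_words:
--             return email
--
--     return None
-- ===== SOURCE B (Python) =====
-- def normalize_name(name: str) -> str:
--     return " ".join(name.lower().split())
--
-- def match_schedule_name_to_email(schedule_name, members):
--     if ", " in schedule_name:
--         parts = schedule_name.split(", ", 1)
--         normalized_name = f"{parts[1]} {parts[0]}" if len(parts) == 2 else schedule_name
--     else:
--         normalized_name = schedule_name
--     normalized_name = normalize_name(normalized_name)
--     schedule_words = set(normalized_name.split())
--     candidate = None
--     for display_name, email in members.items():
--         display_normalized = normalize_name(display_name)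
--         if display_normalized == normalized_name:
--             return email  # first exact match wins globally
--         if candidate is None:
--             display_words = set(display_normalized.split())
--             if display_words <= schedule_words or schedule_words <= display_words:
--                 candidate = email  # first partial match, kept only as fallback
--     return candidate
-- ===== Notes on version B (the rewrite author's own statement) =====
-- stated objective: faster
-- what changed: Replaces A's two full scans (exact pass, then partial pass, each re-normalizing every display name) with a single pass that returns on the first exact match and latches the first partial match as a fallback, normalizing each display name once.
import Mathlib
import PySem

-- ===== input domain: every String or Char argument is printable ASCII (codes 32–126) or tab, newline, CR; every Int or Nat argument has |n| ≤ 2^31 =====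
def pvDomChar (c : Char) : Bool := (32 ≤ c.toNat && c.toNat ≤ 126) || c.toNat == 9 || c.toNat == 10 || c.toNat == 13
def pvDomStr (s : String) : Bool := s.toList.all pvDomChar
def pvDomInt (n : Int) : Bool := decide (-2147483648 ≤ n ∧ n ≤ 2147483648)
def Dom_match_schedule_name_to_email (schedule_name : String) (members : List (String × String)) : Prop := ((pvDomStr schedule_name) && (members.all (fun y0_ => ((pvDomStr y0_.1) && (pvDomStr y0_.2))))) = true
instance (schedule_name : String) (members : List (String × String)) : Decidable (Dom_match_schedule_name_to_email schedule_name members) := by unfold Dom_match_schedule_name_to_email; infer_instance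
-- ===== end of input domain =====

-- B replaces A's two full scans (exact pass then partial pass) by one pass that returns
-- on the first exact match and latches the first partial match as a fallback (objective: faster, constant factor).

-- ===== PORT A =====
-- normalize_name: " ".join(name.lower().split())
def pvNormName (s : String) : String :=
  PySem.Str.join " " (PySem.Str.split₀ (PySem.Str.lower s))

-- the "Last, First" → "First Last" parsing shared verbatim by A and B
def pvParseName (s : String) : String :=
  if PySem.Str.isIn ", " s then
    match PySem.Str.splitMax? s ", " 1 with
    | some parts =>
        if parts.length == 2 then
          PySem.Str.join " " [(PySem.List.pyGet? parts 1).getD "", (PySem.List.pyGet? parts 0).getD ""]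
        else s
    | none => s
  else s

-- A's first loop: exact match
def pvScanExact (nn : String) : List (String × String) → Option String
  | [] => none
  | (d, e) :: t => if pvNormName d == nn then some e else pvScanExact nn t

-- A's second loop: partial (word-subset) match
def pvPartialCond (nn d : String) : Bool :=
  let displayWords := PySem.Set.ofList (PySem.Str.split₀ (pvNormName d))
  let scheduleWords := PySem.Set.ofList (PySem.Str.split₀ nn)
  PySem.Set.issubset displayWords scheduleWords || PySem.Set.issubset scheduleWords displayWords

def pvScanPartial (nn : String) : List (String × String) → Option String
  | [] => none
  | (d, e) :: t => if pvPartialCond nn d then some e else pvScanPartial nn t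

def match_schedule_name_to_email (schedule_name : String) (members : List (String × String)) : Option String :=
  let nn := pvNormName (pvParseName schedule_name)
  match pvScanExact nn members with
  | some e => some e
  | none => pvScanPartial nn members

-- ===== PORT B =====
-- B's single loop: exact match returns immediately; first partial match is latched in `cand`
def pvLoopB (nn : String) (cand : Option String) : List (String × String) → Option String
  | [] => cand
  | (d, e) :: t =>
      let dn := pvNormName d
      if dn == nn then some e
      else
        pvLoopB nn
          (if cand.isNone &&
              (PySem.Set.issubset (PySem.Set.ofList (PySem.Str.split₀ dn)) (PySem.Set.ofList (PySem.Str.split₀ nn)) ||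
               PySem.Set.issubset (PySem.Set.ofList (PySem.Str.split₀ nn)) (PySem.Set.ofList (PySem.Str.split₀ dn)))
           then some e else cand) t

def match_schedule_name_to_email_alt (schedule_name : String) (members : List (String × String)) : Option String :=
  pvLoopB (pvNormName (pvParseName schedule_name)) none members

-- ===== PRECONDITION & SPEC =====
def Spec_match_schedule_name_to_email (schedule_name : String) (members : List (String × String)) (out : Option String) : Prop := out = match_schedule_name_to_email_alt schedule_name members
instance (schedule_name : String) (members : List (String × String)) (out : Option String) : Decidable (Spec_match_schedule_name_to_email schedule_name members out) := by unfold Spec_match_schedule_name_to_email; infer_instance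

-- ===== CLAIM (what is proved, stated in full; the proofs are below) =====
def Claim_equal_match_schedule_name_to_email : Prop := ∀ (schedule_name : String) (members : List (String × String)), Dom_match_schedule_name_to_email schedule_name members → Spec_match_schedule_name_to_email schedule_name members (match_schedule_name_to_email schedule_name members)

-- ===== LEMMAS AND PROOFS =====
-- B's loop = (exact scan) orElse (latched candidate) orElse (partial scan)
theorem pvLoopB_eq (nn : String) (cand : Option String) (ms : List (String × String)) :
    pvLoopB nn cand ms =
      match pvScanExact nn ms with
      | some e => some e
      | none => match cand with
                | some c => some c
                | none => pvScanPartial nn ms := by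
  induction ms generalizing cand with
  | nil => cases cand <;> simp [pvLoopB, pvScanExact, pvScanPartial]
  | cons p t ih =>
      obtain ⟨d, e⟩ := p
      by_cases h : (pvNormName d == nn) = true
      · simp [pvLoopB, pvScanExact, h]
      · rw [show pvLoopB nn cand ((d, e) :: t) =
              pvLoopB nn
                (if cand.isNone && pvPartialCond nn d then some e else cand) t by
            simp [pvLoopB, h, pvPartialCond]]
        rw [ih]
        cases cand with
        | some c => simp [pvScanExact, h]
        | none =>
            by_cases hp : pvPartialCond nn d = true <;>
              simp [pvScanExact, pvScanPartial, h, hp]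

-- ===== VERDICT (by name: the statement is the Claim_ definition above) =====
theorem match_schedule_name_to_email_spec : Claim_equal_match_schedule_name_to_email := by
  intro schedule_name members _
  unfold Spec_match_schedule_name_to_email match_schedule_name_to_email match_schedule_name_to_email_alt
  rw [pvLoopB_eq]
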